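-- pv_equiv track=rewrite | github.com/Prathiksha-Mallik/bmtcl-lastmile | services/logic.py | get_search_token_list
-- ===== SOURCE A (Python) =====
-- def get_search_token_list(text: str) -> list[str]:
--     stop_words = {
--         "a",
--         "an",
--         "and",
--         "at",
--         "bangalore",
--         "bengaluru",
--         "block",
--         "india",
--         "in",
--         "ka",
--         "karnataka",
--         "metro",
--         "near",
--         "road",
--         "station",
--         "street",
--         "the",
--     }
--     cleaned = "".join(char.lower() if char.isalnum() else " " for char in text)
--     return [
--         token
--         for token in cleaned.split()
--         if len(token) > 1 and token not in stop_words
--     ]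
-- ===== SOURCE B (Python) =====
-- def get_search_token_list(text: str) -> list[str]:
--     stop_words = {
--         "a", "an", "and", "at", "bangalore", "bengaluru", "block", "india",
--         "in", "ka", "karnataka", "metro", "near", "road", "station",
--         "street", "the",
--     }
--     tokens = []
--     buf = []
--     for ch in text:
--         if ch.isalnum():
--             buf.append(ch.lower())
--         else:
--             if len(buf) > 1:
--                 tok = "".join(buf)
--                 if tok not in stop_words:
--                     tokens.append(tok)
--             buf = []
--     if len(buf) > 1:
--         tok = "".join(buf)
--         if tok not in stop_words:
--             tokens.append(tok)
--     return tokens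
-- ===== Notes on version B (the rewrite author's own statement) =====
-- stated objective: alternative
-- what changed: Replaces build-a-cleaned-string-then-split-then-filter with a single-pass character scanner that maintains only a current-token buffer and the result list, flushing (and filtering) each token at separator boundaries and once at the end.
import Mathlib
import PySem

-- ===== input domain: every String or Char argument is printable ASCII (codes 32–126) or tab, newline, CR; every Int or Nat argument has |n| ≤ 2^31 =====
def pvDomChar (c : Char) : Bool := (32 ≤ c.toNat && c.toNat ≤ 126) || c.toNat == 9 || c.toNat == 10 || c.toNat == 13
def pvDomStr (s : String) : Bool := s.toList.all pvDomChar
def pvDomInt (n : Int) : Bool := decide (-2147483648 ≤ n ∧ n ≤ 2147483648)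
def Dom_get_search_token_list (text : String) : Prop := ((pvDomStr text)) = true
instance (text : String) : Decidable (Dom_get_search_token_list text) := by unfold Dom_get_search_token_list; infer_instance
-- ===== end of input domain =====

-- B is an alternative single-pass tokenizer (buffer + flush) instead of A's clean-string-then-split-then-filter; same O(n) cost, no intermediate string.

-- the stop-word set literal shared by both Pythons
def pvStopWords : List String :=
  PySem.Set.ofList ["a", "an", "and", "at", "bangalore", "bengaluru", "block", "india",
    "in", "ka", "karnataka", "metro", "near", "road", "station", "street", "the"]

-- ===== PORT A =====
def get_search_token_list (text : String) : List String :=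
  let cleaned : String :=
    String.ofList (text.toList.map
      (fun c => if PySem.Chars.isalnum c then PySem.Chars.lowerChar c else ' '))
  (PySem.Str.split₀ cleaned).filter
    (fun token => decide (1 < PySem.Str.len token) && !(pvStopWords.contains token))

-- ===== PORT B =====
-- flush the buffered token: keep it only if len > 1 and not a stop word
def pvFlush (tokens : List String) (buf : List Char) : List String :=
  if 1 < buf.length then
    let tok := String.ofList buf
    if pvStopWords.contains tok then tokens else tokens ++ [tok]
  else tokens

-- the for-loop of Source B: scan characters, keeping (tokens, buf)
def pvScan : List Char → List String → List Char → List String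
  | [], tokens, buf => pvFlush tokens buf
  | c :: rest, tokens, buf =>
      if PySem.Chars.isalnum c then
        pvScan rest tokens (buf ++ [PySem.Chars.lowerChar c])
      else
        pvScan rest (pvFlush tokens buf) []

def get_search_token_list_alt (text : String) : List String :=
  pvScan text.toList [] []

-- ===== PRECONDITION & SPEC =====
def Spec_get_search_token_list (text : String) (out : List String) : Prop := out = get_search_token_list_alt text
instance (text : String) (out : List String) : Decidable (Spec_get_search_token_list text out) := by unfold Spec_get_search_token_list; infer_instance

-- ===== CLAIM (what is proved, stated in full; the proofs are below) =====
def Claim_equal_get_search_token_list : Prop := ∀ (text : String), Dom_get_search_token_list text → Spec_get_search_token_list text (get_search_token_list text)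

-- ===== LEMMAS AND PROOFS =====

def pvClean (c : Char) : Char :=
  if PySem.Chars.isalnum c then PySem.Chars.lowerChar c else ' '

def pvKeep (t : String) : Bool :=
  decide (1 < PySem.Str.len t) && !(pvStopWords.contains t)

lemma pvKeep_empty : pvKeep "" = false := by decide

lemma pvIsspace_clean (c : Char) :
    PySem.Chars.isspace (pvClean c) = !(PySem.Chars.isalnum c) := by
  by_cases h : PySem.Chars.isalnum c = true
  · have hr : (48 ≤ c.toNat ∧ c.toNat ≤ 57) ∨ (65 ≤ c.toNat ∧ c.toNat ≤ 90) ∨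
        (97 ≤ c.toNat ∧ c.toNat ≤ 122) := by
      simp [PySem.Chars.isalnum, PySem.Chars.isalpha, PySem.Chars.isdigit,
        PySem.Chars.isupper, PySem.Chars.islower, Char.le_def,
        UInt32.le_iff_toNat_le] at h
      omega
    have hl : (48 ≤ (PySem.Chars.lowerChar c).toNat ∧ (PySem.Chars.lowerChar c).toNat ≤ 57) ∨
        (97 ≤ (PySem.Chars.lowerChar c).toNat ∧ (PySem.Chars.lowerChar c).toNat ≤ 122) := by
      simp only [PySem.Chars.lowerChar]
      split_ifs with hu
      · have hu' : 65 ≤ c.toNat ∧ c.toNat ≤ 90 := by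
          simp [PySem.Chars.isupper, Char.le_def, UInt32.le_iff_toNat_le] at hu
          omega
        have hv : (Char.ofNat (c.toNat + 32)).toNat = c.toNat + 32 := by
          rw [Char.toNat_ofNat, if_pos]
          exact Or.inl (by omega)
        omega
      · have hu' : ¬ (65 ≤ c.toNat ∧ c.toNat ≤ 90) := by
          intro hc
          apply hu
          simp [PySem.Chars.isupper, Char.le_def, UInt32.le_iff_toNat_le]
          omega
        omega
    simp only [pvClean, h, if_pos, Bool.not_true]
    simp [PySem.Chars.isspace]
    omega
  · have h' : PySem.Chars.isalnum c = false := by simpa using h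
    simp [pvClean, h', PySem.Chars.isspace]

lemma pvFlush_eq (tokens : List String) (buf : List Char) :
    pvFlush tokens buf =
      tokens ++ (if pvKeep (String.ofList buf) then [String.ofList buf] else []) := by
  simp only [pvFlush, pvKeep, PySem.Str.len, String.toList_ofList, Bool.and_eq_true,
    Bool.not_eq_true', decide_eq_true_eq]
  split_ifs with h1 h2 h3 h4 <;> simp_all; omega

-- the loop invariant: A's split-then-filter over the cleaned remainder equals B's scan
lemma pvScan_eq (cs : List Char) (cur : List Char) (acc : List (List Char)) :
    (List.map String.ofList (PySem.Chars.split₀.go (cs.map pvClean) cur acc)).filter pvKeep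
      = pvScan cs ((List.map String.ofList acc.reverse).filter pvKeep) cur.reverse := by
  induction cs generalizing cur acc with
  | nil =>
      simp only [List.map_nil, PySem.Chars.split₀.go, pvScan]
      rw [pvFlush_eq]
      by_cases h : cur = []
      · subst h; simp [pvKeep_empty]
      · simp [List.isEmpty_eq_false_iff.mpr h, List.filter_singleton]
  | cons c rest ih =>
      simp only [List.map_cons]
      by_cases h : PySem.Chars.isalnum c = true
      · have hs : PySem.Chars.isspace (pvClean c) = false := by
          rw [pvIsspace_clean, h]; rfl
        have hc : pvClean c = PySem.Chars.lowerChar c := by simp [pvClean, h]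
        simp only [PySem.Chars.split₀.go, hs, if_neg Bool.false_ne_true, pvScan, h, if_pos]
        rw [hc, ih]
        simp
      · have hs : PySem.Chars.isspace (pvClean c) = true := by
          rw [pvIsspace_clean]; simp [h]
        simp only [PySem.Chars.split₀.go, hs, if_pos, pvScan, h]
        by_cases hcur : cur = []
        · subst hcur
          simp only [List.isEmpty_nil, if_pos, ih, List.reverse_nil]
          rw [pvFlush_eq]
          simp [pvKeep_empty]
        · simp only [List.isEmpty_eq_false_iff.mpr hcur, Bool.false_eq_true]
          rw [if_neg (by simp), ih, pvFlush_eq]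
          simp [List.filter_singleton, Bool.cond_eq_ite]

-- ===== VERDICT (by name: the statement is the Claim_ definition above) =====
theorem get_search_token_list_spec : Claim_equal_get_search_token_list := by
  intro text _
  have h := pvScan_eq text.toList [] []
  simp only [List.reverse_nil, List.map_nil, List.filter_nil] at h
  show get_search_token_list text = get_search_token_list_alt text
  unfold get_search_token_list get_search_token_list_alt
  simp only [PySem.Str.split₀, String.toList_ofList, PySem.Chars.split₀]
  exact h
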